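-- pv_equiv track=rewrite | github.com/MihaplAyMF/study | Prog/py/labs/lab2/pass_task1.py | fails_basic_criteria
-- ===== SOURCE A (Python) =====
-- import string
--
-- criteria = {
--     "min_length": 9,
--     "require_digits": True,
--     "require_upper": True,
--     "require_special": True
-- }
--
-- def fails_basic_criteria(password):
--     """Перевіряє, чи пароль не відповідає базовим вимогам."""
--     if len(password) < criteria["min_length"]:
--         return True
--     if criteria["require_digits"] and not any(c.isdigit() for c in password):
--         return True
--     if criteria["require_upper"] and not any(c.isupper() for c in password):
--         return True
--     if (
--         criteria["require_special"]
--         and not any(c in string.punctuation for c in password)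
--     ):
--         return True
--     if not any(c.islower() for c in password):
--         return True
--     return False
-- ===== SOURCE B (Python) =====
-- import string
--
-- criteria = {
--     "min_length": 9,
--     "require_digits": True,
--     "require_upper": True,
--     "require_special": True
-- }
--
-- def fails_basic_criteria(password):
--     """Single pass over the characters, collecting boolean flags."""
--     has_digit = has_upper = has_special = has_lower = False
--     for c in password:
--         if c.isdigit():
--             has_digit = True
--         if c.isupper():
--             has_upper = True
--         if c in string.punctuation:
--             has_special = True
--         if c.islower():
--             has_lower = True
--     return (len(password) < criteria["min_length"]
--             or (criteria["require_digits"] and not has_digit)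
--             or (criteria["require_upper"] and not has_upper)
--             or (criteria["require_special"] and not has_special)
--             or not has_lower)
-- ===== Notes on version B (the rewrite author's own statement) =====
-- stated objective: simpler
-- what changed: Replaces A's chain of up to five separate any() scans over the password with one loop that sets four boolean flags, followed by a single combined OR.
import Mathlib
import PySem

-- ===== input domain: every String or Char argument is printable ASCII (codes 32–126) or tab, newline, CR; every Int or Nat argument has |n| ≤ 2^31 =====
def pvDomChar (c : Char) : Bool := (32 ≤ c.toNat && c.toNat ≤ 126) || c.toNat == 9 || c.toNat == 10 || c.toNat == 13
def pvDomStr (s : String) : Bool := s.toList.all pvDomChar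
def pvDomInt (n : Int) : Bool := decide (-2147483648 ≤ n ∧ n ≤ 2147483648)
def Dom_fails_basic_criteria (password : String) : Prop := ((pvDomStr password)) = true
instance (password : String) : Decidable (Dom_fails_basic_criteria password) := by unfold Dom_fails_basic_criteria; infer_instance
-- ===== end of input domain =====

-- B replaces A's chain of up to five separate any() scans with one pass setting four flags, then one combined OR (objective: simpler).

-- string.punctuation
def pvPunct : List Char := "!\"#$%&'()*+,-./:;<=>?@[\\]^_`{|}~".toList

-- ===== PORT A =====
def fails_basic_criteria (password : String) : Bool :=
  if PySem.Str.len password < (9 : Int) then true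
  else if true && !(password.toList.any PySem.Chars.isdigit) then true
  else if true && !(password.toList.any PySem.Chars.isupper) then true
  else if true && !(password.toList.any (fun c => pvPunct.contains c)) then true
  else if !(password.toList.any PySem.Chars.islower) then true
  else false

-- ===== PORT B =====
def pvStep (st : Bool × Bool × Bool × Bool) (c : Char) : Bool × Bool × Bool × Bool :=
  ((if PySem.Chars.isdigit c then true else st.1),
   (if PySem.Chars.isupper c then true else st.2.1),
   (if pvPunct.contains c then true else st.2.2.1),
   (if PySem.Chars.islower c then true else st.2.2.2))

def fails_basic_criteria_alt (password : String) : Bool :=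
  let st := password.toList.foldl pvStep (false, false, false, false)
  decide (PySem.Str.len password < (9 : Int)) || (true && !st.1) || (true && !st.2.1)
    || (true && !st.2.2.1) || !st.2.2.2

-- ===== PRECONDITION & SPEC =====
def Spec_fails_basic_criteria (password : String) (out : Bool) : Prop := out = fails_basic_criteria_alt password
instance (password : String) (out : Bool) : Decidable (Spec_fails_basic_criteria password out) := by unfold Spec_fails_basic_criteria; infer_instance

-- ===== CLAIM (what is proved, stated in full; the proofs are below) =====
def Claim_equal_fails_basic_criteria : Prop := ∀ (password : String), Dom_fails_basic_criteria password → Spec_fails_basic_criteria password (fails_basic_criteria password)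

-- ===== LEMMAS AND PROOFS =====

theorem pvStep_foldl (cs : List Char) (st : Bool × Bool × Bool × Bool) :
    cs.foldl pvStep st =
      (st.1 || cs.any PySem.Chars.isdigit,
       st.2.1 || cs.any PySem.Chars.isupper,
       st.2.2.1 || cs.any (fun c => pvPunct.contains c),
       st.2.2.2 || cs.any PySem.Chars.islower) := by
  induction cs generalizing st with
  | nil => simp
  | cons c cs ih =>
    simp only [List.foldl_cons, List.any_cons, ih, pvStep]
    obtain ⟨a, b, d, e⟩ := st
    by_cases h1 : PySem.Chars.isdigit c <;>
    by_cases h2 : PySem.Chars.isupper c <;>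
    by_cases h3 : pvPunct.contains c <;>
    by_cases h4 : PySem.Chars.islower c <;>
      simp [h1, h2, h3, h4, Bool.or_comm, Bool.or_left_comm, Bool.or_assoc]

theorem pvNotAny (l : List Char) :
    (decide (∀ x ∈ l, x ∉ pvPunct)) = !l.any (fun c => decide (c ∈ pvPunct)) := by
  induction l with
  | nil => simp
  | cons c cs ih => by_cases h : c ∈ pvPunct <;> simp [h, ih]

-- ===== VERDICT (by name: the statement is the Claim_ definition above) =====
theorem fails_basic_criteria_spec : Claim_equal_fails_basic_criteria := by
  intro password _
  unfold Spec_fails_basic_criteria fails_basic_criteria fails_basic_criteria_alt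
  simp only [pvStep_foldl, Bool.false_or]
  by_cases hl : PySem.Str.len password < (9 : Int) <;>
  by_cases h1 : password.toList.any PySem.Chars.isdigit <;>
  by_cases h2 : password.toList.any PySem.Chars.isupper <;>
  by_cases h3 : password.toList.any (fun c => pvPunct.contains c) <;>
  by_cases h4 : password.toList.any PySem.Chars.islower <;>
    simp [hl, h1, h2, h3, h4, pvNotAny]
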